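-- pv_equiv track=rewrite | github.com/MariuszMalec/P_CheckNc | CheckNc.py | getMachine
-- ===== SOURCE A (Python) =====
-- def getMachine(lines):
--     matches = [match for match in lines if "MACHINE" in match]
--     machine = "-"
--     for match in matches:
--         if (match.__contains__("HSTM_300HD_SIM840D_Py")):
--             machine = "HSTM300HD"
--         if (match.__contains__("HSTM_500_SIM840D_Py")):
--             machine = "HSTM500HD"
--         if (match.__contains__("HSTM_300_SIM840D_Py")):
--             machine = "HSTM300"
--     return machine
-- ===== SOURCE B (Python) =====
-- def getMachine(lines):
--     for line in reversed(lines):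
--         if "MACHINE" not in line:
--             continue
--         if "HSTM_300_SIM840D_Py" in line:
--             return "HSTM300"
--         if "HSTM_500_SIM840D_Py" in line:
--             return "HSTM500HD"
--         if "HSTM_300HD_SIM840D_Py" in line:
--             return "HSTM300HD"
--     return "-"
-- ===== Notes on version B (the rewrite author's own statement) =====
-- stated objective: alternative
-- what changed: Replaces the forward filter-then-accumulate pass (last assignment wins) by a single reversed scan with early return on the first MACHINE line matching any pattern, with the intra-line if-priority inverted to elif chain.
import Mathlib
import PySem

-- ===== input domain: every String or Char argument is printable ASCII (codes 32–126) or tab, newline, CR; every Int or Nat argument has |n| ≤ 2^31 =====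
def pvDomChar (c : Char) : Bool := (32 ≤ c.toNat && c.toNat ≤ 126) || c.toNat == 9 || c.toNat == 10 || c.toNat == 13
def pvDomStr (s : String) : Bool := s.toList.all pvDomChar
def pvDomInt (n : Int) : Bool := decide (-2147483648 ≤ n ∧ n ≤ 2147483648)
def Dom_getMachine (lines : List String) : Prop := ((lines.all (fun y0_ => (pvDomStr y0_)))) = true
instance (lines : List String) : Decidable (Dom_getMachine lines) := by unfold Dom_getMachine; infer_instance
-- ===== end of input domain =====

-- B is an alternative decomposition: one reversed scan with early return instead of A's
-- filter-then-accumulate forward pass; return value proved equal, no speed claim.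

-- ===== PORT A =====
def getMachine (lines : List String) : String :=
  let ms := lines.filter (fun m => PySem.Str.isIn "MACHINE" m)
  ms.foldl (fun machine m =>
    let machine := if PySem.Str.isIn "HSTM_300HD_SIM840D_Py" m then "HSTM300HD" else machine
    let machine := if PySem.Str.isIn "HSTM_500_SIM840D_Py" m then "HSTM500HD" else machine
    if PySem.Str.isIn "HSTM_300_SIM840D_Py" m then "HSTM300" else machine) "-"

-- ===== PORT B =====
-- one iteration of B's loop body: some v = early return with v, none = continue
def pvStep (line : String) : Option String :=
  if !PySem.Str.isIn "MACHINE" line then none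
  else if PySem.Str.isIn "HSTM_300_SIM840D_Py" line then some "HSTM300"
  else if PySem.Str.isIn "HSTM_500_SIM840D_Py" line then some "HSTM500HD"
  else if PySem.Str.isIn "HSTM_300HD_SIM840D_Py" line then some "HSTM300HD"
  else none

def pvLoop : List String → String
  | [] => "-"
  | l :: rest => match pvStep l with
    | some v => v
    | none => pvLoop rest

def getMachine_alt (lines : List String) : String := pvLoop lines.reverse

-- ===== PRECONDITION & SPEC =====
def Spec_getMachine (lines : List String) (out : String) : Prop := out = getMachine_alt lines
instance (lines : List String) (out : String) : Decidable (Spec_getMachine lines out) := by unfold Spec_getMachine; infer_instance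

-- ===== CLAIM (what is proved, stated in full; the proofs are below) =====
def Claim_equal_getMachine : Prop := ∀ (lines : List String), Dom_getMachine lines → Spec_getMachine lines (getMachine lines)

-- ===== LEMMAS AND PROOFS =====

-- pvLoop with an explicit fall-through value (what the loop returns when no line matches)
def pvLoopD : List String → String → String
  | [], acc => acc
  | l :: rest, acc => match pvStep l with
    | some v => v
    | none => pvLoopD rest acc

theorem pvLoopD_append (xs ys : List String) (acc : String) :
    pvLoopD (xs ++ ys) acc = pvLoopD xs (pvLoopD ys acc) := by
  induction xs with
  | nil => rfl
  | cons l rest ih =>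
    simp only [List.cons_append, pvLoopD]
    cases pvStep l <;> simp [ih]

theorem pvLoop_eq_pvLoopD (xs : List String) : pvLoop xs = pvLoopD xs "-" := by
  induction xs with
  | nil => rfl
  | cons l rest ih =>
    simp only [pvLoop, pvLoopD]
    cases pvStep l <;> simp [ih]

-- A's per-line update equals B's per-line classification, for a MACHINE line
theorem step_eq (m : String) (hm : PySem.Str.isIn "MACHINE" m = true) (acc : String) :
    (let machine := if PySem.Str.isIn "HSTM_300HD_SIM840D_Py" m then "HSTM300HD" else acc
     let machine := if PySem.Str.isIn "HSTM_500_SIM840D_Py" m then "HSTM500HD" else machine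
     if PySem.Str.isIn "HSTM_300_SIM840D_Py" m then "HSTM300" else machine)
      = (pvStep m).getD acc := by
  simp only [pvStep, hm, Bool.not_true]
  split_ifs <;> simp_all

theorem foldl_eq_pvLoopD (ms : List String) (acc : String)
    (h : ∀ m ∈ ms, PySem.Str.isIn "MACHINE" m = true) :
    ms.foldl (fun machine m =>
      let machine := if PySem.Str.isIn "HSTM_300HD_SIM840D_Py" m then "HSTM300HD" else machine
      let machine := if PySem.Str.isIn "HSTM_500_SIM840D_Py" m then "HSTM500HD" else machine
      if PySem.Str.isIn "HSTM_300_SIM840D_Py" m then "HSTM300" else machine) acc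
      = pvLoopD ms.reverse acc := by
  induction ms generalizing acc with
  | nil => rfl
  | cons m rest ih =>
    have hm := h m (List.mem_cons_self ..)
    simp only [List.foldl_cons, List.reverse_cons, pvLoopD_append]
    rw [ih _ (fun x hx => h x (List.mem_cons_of_mem _ hx))]
    congr 1
    rw [step_eq m hm acc]
    cases h2 : pvStep m <;> simp [pvLoopD, h2]

-- non-MACHINE lines are skipped by pvLoopD
theorem pvLoopD_filter (xs : List String) (acc : String) :
    pvLoopD xs acc = pvLoopD (xs.filter (fun m => PySem.Str.isIn "MACHINE" m)) acc := by
  induction xs with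
  | nil => rfl
  | cons l rest ih =>
    by_cases hl : PySem.Str.isIn "MACHINE" l = true
    · simp only [List.filter_cons, hl, if_true, pvLoopD]
      cases pvStep l <;> simp [ih]
    · have hstep : pvStep l = none := by
        simp [pvStep, Bool.not_eq_true] at hl ⊢; simp [hl]
      simp only [List.filter_cons, hl, pvLoopD, hstep]
      exact ih

-- ===== VERDICT (by name: the statement is the Claim_ definition above) =====
theorem getMachine_spec : Claim_equal_getMachine := by
  intro lines _
  unfold Spec_getMachine getMachine getMachine_alt
  rw [pvLoop_eq_pvLoopD, pvLoopD_filter lines.reverse, List.filter_reverse]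
  exact foldl_eq_pvLoopD _ "-" (fun m hm => (List.mem_filter.mp hm).2)
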